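-- pv_equiv track=rewrite | github.com/JSON-loading-and-unloading/Algorithm | dongkyu/week6/16935.py | solve
-- ===== SOURCE A (Python) =====
-- def solve(arr, operations, n, m):
--     answer = arr
--     for o in operations:
--         if o == 1:
--             answer = answer[::-1]
--         elif o == 2:
--             answer = [row[::-1] for row in answer]
--         elif o == 3:
--             n, m = m, n
--             answer = [list(reversed(column)) for column in zip(*answer)]
--         elif o == 4:
--             n, m = m, n
--             answer = [list(row) for row in zip(*answer)][::-1]
--         elif o == 5:
--             temp = [[0] * m for _ in range(n)]
--             y, x = n // 2, m // 2
--             for i in range(n):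
--                 for j in range(m):
--                     if 0 <= i < y and 0 <= j < x:
--                         temp[i][j] = answer[i + y][j]
--                     elif 0 <= i < y and x <= j < m:
--                         temp[i][j] = answer[i][j - x]
--                     elif y <= i < n and x <= j < m:
--                         temp[i][j] = answer[i - y][j]
--                     else:
--                         temp[i][j] = answer[i][j - x]
--             answer = temp
--         else:
--             temp = [[0] * m for _ in range(n)]
--             y, x = n // 2, m // 2
--             for i in range(n):
--                 for j in range(m):
--                     if 0 <= i < y and 0 <= j < x:
--                         temp[i][j] = answer[i][j - x]
--                     elif 0 <= i < y and x <= j < m: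
--                         temp[i][j] = answer[i + y][j]
--                     elif y <= i < n and x <= j < m:
--                         temp[i][j] = answer[i][j - x]
--                     else:
--                         temp[i][j] = answer[i - y][j]
--             answer = temp
--     return answer
-- ===== SOURCE B (Python) =====
-- def solve(arr, operations, n, m):
--     # Lazy flips (ops 1/2 toggle flags in O(1)); quadrant ops rebuilt row-wise from slices.
--     g = arr
--     v = h = False   # pending: row-order flip (op 1), per-row flip (op 2)
--
--     def materialize():
--         nonlocal g, v, h
--         if v:
--             g = g[::-1]
--         if h:
--             g = [row[::-1] for row in g]
--         v = h = False
--
--     for o in operations: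
--         if o == 1:
--             v = not v
--         elif o == 2:
--             h = not h
--         elif o == 3:
--             materialize()
--             n, m = m, n
--             g = [list(reversed(c)) for c in zip(*g)]
--         elif o == 4:
--             materialize()
--             n, m = m, n
--             g = [list(c) for c in zip(*g)][::-1]
--         else:
--             materialize()
--             g = quadrant(g, n, m, o == 5)
--     materialize()
--     return g
--
--
-- def quadrant(g, n, m, is5):
--     # quadrant cyclic shift, built row-wise by concatenating half-row slices
--     y, x = n // 2, m // 2
--     out = []
--     if is5:
--         for i in range(y):
--             out.append(g[i + y][:x] + g[i][:m - x])
--         for i in range(y, n):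
--             out.append(g[i][m - x:] + g[i - y][x:])
--     else:
--         for i in range(y):
--             out.append(g[i][m - x:] + g[i + y][x:])
--         for i in range(y, n):
--             out.append(g[i - y][:x] + g[i][:m - x])
--     return out
-- ===== Notes on version B (the rewrite author's own statement) =====
-- stated objective: alternative
-- what changed: B defers ops 1/2 behind two O(1) pending-flip flags materialized only when a later op needs the grid, and replaces A's per-cell quadrant double loop (four-way branch with negative-index arithmetic) by a row-wise construction that concatenates two half-row slices per output row; …
-- outside the precondition, e.g. on solve([[1, 2], [3]], [5], 2, 2): A returns [[3, 1], [3, 2]], B returns [[3, 1], [2]]; on solve([[1], [2, 3]], [3, 5], 1, 2): A returns [[2], [2]], B raises IndexError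
import Mathlib
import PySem

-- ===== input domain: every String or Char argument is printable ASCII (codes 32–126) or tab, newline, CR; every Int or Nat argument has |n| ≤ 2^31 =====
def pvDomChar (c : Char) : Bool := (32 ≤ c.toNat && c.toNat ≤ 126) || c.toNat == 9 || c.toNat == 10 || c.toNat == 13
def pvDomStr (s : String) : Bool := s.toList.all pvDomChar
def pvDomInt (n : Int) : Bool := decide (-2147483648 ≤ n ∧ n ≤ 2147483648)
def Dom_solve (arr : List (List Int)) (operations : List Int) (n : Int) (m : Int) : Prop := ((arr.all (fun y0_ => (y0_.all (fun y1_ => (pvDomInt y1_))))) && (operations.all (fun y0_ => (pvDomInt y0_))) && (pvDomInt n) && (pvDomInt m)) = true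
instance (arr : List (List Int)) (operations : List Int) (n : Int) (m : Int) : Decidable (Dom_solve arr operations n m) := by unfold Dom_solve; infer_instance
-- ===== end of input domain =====

-- B defers the flip ops 1/2 behind O(1) pending flags materialized only when a later op
-- needs the grid, and rebuilds the quadrant ops 5/6 row-wise out of half-row slices
-- instead of A's per-cell four-way branch; the ports agree on every input in Pre_solve.

-- ===== PORT A =====
-- Python zip(*g): columns of g, truncated to the shortest row (zip of no rows is []).
def pyZip (g : List (List Int)) : List (List Int) :=
  match (g.map (fun r => r.length)).min? with
  | none => []
  | some k => (List.range k).map (fun j => g.map (fun r => r.getD j 0))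

-- the op-5 double loop of A, cell by cell (temp[i][j] assignments become a map over ranges)
def op5gridA (answer : List (List Int)) (n m : Int) : List (List Int) :=
  let y := PySem.Int.floordiv n 2
  let x := PySem.Int.floordiv m 2
  (PySem.List.pyRange 0 n 1).map (fun i =>
    (PySem.List.pyRange 0 m 1).map (fun j =>
      if 0 ≤ i ∧ i < y ∧ 0 ≤ j ∧ j < x then
        PySem.List.pyGetD (PySem.List.pyGetD answer (i + y) []) j 0
      else if 0 ≤ i ∧ i < y ∧ x ≤ j ∧ j < m then
        PySem.List.pyGetD (PySem.List.pyGetD answer i []) (j - x) 0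
      else if y ≤ i ∧ i < n ∧ x ≤ j ∧ j < m then
        PySem.List.pyGetD (PySem.List.pyGetD answer (i - y) []) j 0
      else
        PySem.List.pyGetD (PySem.List.pyGetD answer i []) (j - x) 0))

-- the op-6 double loop of A
def op6gridA (answer : List (List Int)) (n m : Int) : List (List Int) :=
  let y := PySem.Int.floordiv n 2
  let x := PySem.Int.floordiv m 2
  (PySem.List.pyRange 0 n 1).map (fun i =>
    (PySem.List.pyRange 0 m 1).map (fun j =>
      if 0 ≤ i ∧ i < y ∧ 0 ≤ j ∧ j < x then
        PySem.List.pyGetD (PySem.List.pyGetD answer i []) (j - x) 0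
      else if 0 ≤ i ∧ i < y ∧ x ≤ j ∧ j < m then
        PySem.List.pyGetD (PySem.List.pyGetD answer (i + y) []) j 0
      else if y ≤ i ∧ i < n ∧ x ≤ j ∧ j < m then
        PySem.List.pyGetD (PySem.List.pyGetD answer i []) (j - x) 0
      else
        PySem.List.pyGetD (PySem.List.pyGetD answer (i - y) []) j 0))

def stepA : (List (List Int) × Int × Int) → Int → (List (List Int) × Int × Int)
  | (answer, n, m), o =>
    if o = 1 then (answer.reverse, n, m)
    else if o = 2 then (answer.map List.reverse, n, m)
    else if o = 3 then ((pyZip answer).map List.reverse, m, n)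
    else if o = 4 then ((pyZip answer).reverse, m, n)
    else if o = 5 then (op5gridA answer n m, n, m)
    else (op6gridA answer n m, n, m)

def solve (arr : List (List Int)) (operations : List Int) (n : Int) (m : Int) : List (List Int) :=
  (operations.foldl stepA (arr, n, m)).1

-- ===== PORT B =====
-- Source B's materialize(): apply the two pending flips
def matzVH (v h : Bool) (g : List (List Int)) : List (List Int) :=
  let g1 := if v then g.reverse else g
  if h then g1.map List.reverse else g1

-- Source B's quadrant helper: each output row is the concatenation of two half-row slices
def quadrantB (g : List (List Int)) (n m : Int) (is5 : Bool) : List (List Int) :=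
  let y := PySem.Int.floordiv n 2
  let x := PySem.Int.floordiv m 2
  if is5 then
    (PySem.List.pyRange 0 y 1).map (fun i =>
      PySem.List.slice (PySem.List.pyGetD g (i + y) []) none (some x)
        ++ PySem.List.slice (PySem.List.pyGetD g i []) none (some (m - x)))
    ++ (PySem.List.pyRange y n 1).map (fun i =>
      PySem.List.slice (PySem.List.pyGetD g i []) (some (m - x)) none
        ++ PySem.List.slice (PySem.List.pyGetD g (i - y) []) (some x) none)
  else
    (PySem.List.pyRange 0 y 1).map (fun i =>
      PySem.List.slice (PySem.List.pyGetD g i []) (some (m - x)) none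
        ++ PySem.List.slice (PySem.List.pyGetD g (i + y) []) (some x) none)
    ++ (PySem.List.pyRange y n 1).map (fun i =>
      PySem.List.slice (PySem.List.pyGetD g (i - y) []) none (some x)
        ++ PySem.List.slice (PySem.List.pyGetD g i []) none (some (m - x)))

-- state: (g, v, h, n, m)
def stepB : (List (List Int) × Bool × Bool × Int × Int) → Int → (List (List Int) × Bool × Bool × Int × Int)
  | (g, v, h, n, m), o =>
    if o = 1 then (g, !v, h, n, m)
    else if o = 2 then (g, v, !h, n, m)
    else if o = 3 then ((pyZip (matzVH v h g)).map List.reverse, false, false, m, n)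
    else if o = 4 then ((pyZip (matzVH v h g)).reverse, false, false, m, n)
    else (quadrantB (matzVH v h g) n m (o = 5), false, false, n, m)

def solve_alt (arr : List (List Int)) (operations : List Int) (n : Int) (m : Int) : List (List Int) :=
  let s := operations.foldl stepB (arr, false, false, n, m)
  matzVH s.2.1 s.2.2.1 s.1

-- ===== PRECONDITION & SPEC =====
-- Every op outside 1-4 is a quadrant shuffle; it must see the current leading dimension
-- (n, or m after an odd number of preceding transpose ops 3/4) nonpositive — then both
-- programs produce the empty grid — or act on a grid of exactly the declared n×m shape
-- with n,m > 0.  Outside Pre_ A may raise IndexError, or return a value resting on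
-- accidental negative-index wraparound over ragged rows (an unspecified corner), where
-- B's slices clamp or raise instead; ops 1-4 alone are admitted on any grid.
def quadDimOK (operations : List Int) (n m : Int) : Prop :=
  ∀ k : Nat, (hk : k < operations.length) →
    (operations[k] = 1 ∨ operations[k] = 2 ∨ operations[k] = 3 ∨ operations[k] = 4) ∨
    ((((operations.take k).countP (fun o => o == 3 || o == 4)) % 2 = 0 → n ≤ 0) ∧
     (((operations.take k).countP (fun o => o == 3 || o == 4)) % 2 = 1 → m ≤ 0))
def Pre_solve (arr : List (List Int)) (operations : List Int) (n : Int) (m : Int) : Prop :=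
  quadDimOK operations n m
  ∨ ((arr.length : Int) = n ∧ (∀ r ∈ arr, (r.length : Int) = m) ∧ 0 < n ∧ 0 < m)
instance (arr : List (List Int)) (operations : List Int) (n : Int) (m : Int) : Decidable (Pre_solve arr operations n m) := by unfold Pre_solve quadDimOK; infer_instance

def pvWitness_solve : List (List Int) × List Int × Int × Int :=
  ([[1, 2, 3], [4, 5, 6]], [1, 3, 5, 6, 2, 4], 2, 3)

def Spec_solve (arr : List (List Int)) (operations : List Int) (n : Int) (m : Int) (out : List (List Int)) : Prop := out = solve_alt arr operations n m
instance (arr : List (List Int)) (operations : List Int) (n : Int) (m : Int) (out : List (List Int)) : Decidable (Spec_solve arr operations n m out) := by unfold Spec_solve; infer_instance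

-- ===== CLAIM (what is proved, stated in full; the proofs are below) =====
def Claim_equal_solve : Prop := ∀ (arr : List (List Int)) (operations : List Int) (n : Int) (m : Int), Dom_solve arr operations n m → Pre_solve arr operations n m → Spec_solve arr operations n m (solve arr operations n m)

-- ===== LEMMAS AND PROOFS =====

theorem matzVH_id (g : List (List Int)) : matzVH false false g = g := by
  simp [matzVH]

theorem matzVH_reverse (v h : Bool) (g : List (List Int)) :
    (matzVH v h g).reverse = matzVH (!v) h g := by
  cases v <;> cases h <;>
    simp [matzVH, List.map_reverse, List.reverse_reverse]

theorem matzVH_map_reverse (v h : Bool) (g : List (List Int)) :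
    (matzVH v h g).map List.reverse = matzVH v (!h) g := by
  cases v <;> cases h <;>
    simp [matzVH, List.map_map, List.map_id]

-- exact n×m shape
def ShapeNM (g : List (List Int)) (n m : Int) : Prop :=
  (g.length : Int) = n ∧ ∀ r ∈ g, (r.length : Int) = m

theorem shape_reverse {g : List (List Int)} {n m : Int} (h : ShapeNM g n m) :
    ShapeNM g.reverse n m := by
  obtain ⟨h1, h2⟩ := h
  exact ⟨by simpa using h1, fun r hr => h2 r (List.mem_reverse.mp hr)⟩

theorem shape_map_reverse {g : List (List Int)} {n m : Int} (h : ShapeNM g n m) :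
    ShapeNM (g.map List.reverse) n m := by
  obtain ⟨h1, h2⟩ := h
  refine ⟨by simpa using h1, fun r hr => ?_⟩
  obtain ⟨r0, hr0, rfl⟩ := List.mem_map.mp hr
  simpa using h2 r0 hr0

theorem min?_const (xs : List Nat) (k : Nat) (hne : xs ≠ []) (hall : ∀ a ∈ xs, a = k) :
    xs.min? = some k := by
  cases h : xs.min? with
  | none => exact absurd (List.min?_eq_none_iff.mp h) hne
  | some a => rw [hall a (List.min?_mem h)]

theorem pyZip_of_shape {g : List (List Int)} {n m : Int} (h : ShapeNM g n m)
    (hn : 0 < n) :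
    pyZip g = (List.range m.toNat).map (fun j => g.map (fun r => r.getD j 0)) := by
  obtain ⟨h1, h2⟩ := h
  have hne : g ≠ [] := by
    intro e; subst e; simp at h1; omega
  have hmin : (g.map (fun r => r.length)).min? = some m.toNat := by
    apply min?_const _ _ (by simpa using hne)
    intro a ha
    obtain ⟨r, hr, rfl⟩ := List.mem_map.mp ha
    have := h2 r hr; omega
  unfold pyZip
  rw [hmin]

theorem shape_pyZip {g : List (List Int)} {n m : Int} (h : ShapeNM g n m)
    (hn : 0 < n) (hm : 0 ≤ m) : ShapeNM (pyZip g) m n := by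
  rw [pyZip_of_shape h hn]
  constructor
  · simp [Int.toNat_of_nonneg hm]
  · intro r hr
    obtain ⟨j, hj, rfl⟩ := List.mem_map.mp hr
    simpa using h.1

-- indexing + take/drop bridges used by the quadrant proof
theorem mapRange_pyGetD_take (xs : List Int) (K : Nat) (hK : K ≤ xs.length) :
    (List.range K).map (fun k : Nat => PySem.List.pyGetD xs (k : Int) 0) = xs.take K := by
  apply List.ext_getElem
  · simp [hK]
  · intro i h1 h2
    simp only [List.getElem_map, List.getElem_range, List.getElem_take]
    rw [PySem.List.pyGetD_natCast, List.getD_eq_getElem?_getD,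
      List.getElem?_eq_getElem (by simp at h2; omega)]
    simp

theorem mapRange_pyGetD_neg_drop (xs : List Int) (X : Nat) (hX : X ≤ xs.length) :
    (List.range X).map (fun k : Nat => PySem.List.pyGetD xs ((k : Int) - (X : Int)) 0)
      = xs.drop (xs.length - X) := by
  apply List.ext_getElem
  · simp; omega
  · intro i h1 h2
    simp only [List.getElem_map, List.getElem_range, List.getElem_drop]
    have hi : i < X := by simpa using h1
    have : ((i : Int) - (X : Int)) = -(((X - i : Nat) : Int)) := by omega
    rw [this, PySem.List.pyGetD_neg_natCast _ _ _ (by omega) (by omega)]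
    congr 1
    omega

theorem piece_take (xs : List Int) (x : Int) (h0 : 0 ≤ x) (hx : x ≤ (xs.length : Int)) :
    (PySem.List.pyRange 0 x 1).map (fun j => PySem.List.pyGetD xs j 0)
      = PySem.List.slice xs none (some x) := by
  rw [PySem.List.slice_to xs h0, PySem.List.pyRange_one, List.map_map]
  have : ((fun j => PySem.List.pyGetD xs j 0) ∘ fun k : Nat => 0 + (k : Int))
      = fun k : Nat => PySem.List.pyGetD xs (k : Int) 0 := by
    funext k; simp
  rw [this]
  have hK : (x - 0).toNat ≤ xs.length := by omega
  rw [mapRange_pyGetD_take xs _ hK]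
  congr 1; omega

theorem piece_take_shift (xs : List Int) (x m : Int) (_h0 : 0 ≤ x) (_hxm : x ≤ m)
    (hm : m - x ≤ (xs.length : Int)) :
    (PySem.List.pyRange x m 1).map (fun j => PySem.List.pyGetD xs (j - x) 0)
      = PySem.List.slice xs none (some (m - x)) := by
  rw [PySem.List.slice_to xs (by omega), PySem.List.pyRange_one, List.map_map]
  have : ((fun j => PySem.List.pyGetD xs (j - x) 0) ∘ fun k : Nat => x + (k : Int))
      = fun k : Nat => PySem.List.pyGetD xs (k : Int) 0 := by
    funext k; simp
  rw [this, mapRange_pyGetD_take xs _ (by omega)]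

theorem piece_drop (xs : List Int) (x m : Int) (h0 : 0 ≤ x) (hm : m = (xs.length : Int)) :
    (PySem.List.pyRange x m 1).map (fun j => PySem.List.pyGetD xs j 0)
      = PySem.List.slice xs (some x) none := by
  subst hm
  rw [PySem.List.slice_from xs h0]
  exact PySem.List.map_pyGetD_pyRange' xs 0 h0

theorem piece_neg_drop (xs : List Int) (x m : Int) (h0 : 0 ≤ x) (hxm : x ≤ m)
    (hm : m = (xs.length : Int)) :
    (PySem.List.pyRange 0 x 1).map (fun j => PySem.List.pyGetD xs (j - x) 0)
      = PySem.List.slice xs (some (m - x)) none := by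
  rw [PySem.List.slice_from xs (by omega), PySem.List.pyRange_one, List.map_map]
  have : ((fun j => PySem.List.pyGetD xs (j - x) 0) ∘ fun k : Nat => 0 + (k : Int))
      = fun k : Nat => PySem.List.pyGetD xs ((k : Int) - x) 0 := by
    funext k; simp
  rw [this]
  have hx' : (x - 0).toNat = x.toNat := by omega
  rw [hx']
  have h3 := mapRange_pyGetD_neg_drop xs x.toNat (by omega)
  have hcast : ∀ k : Nat, ((k : Int) - ((x.toNat : Nat) : Int)) = (k : Int) - x := by
    intro k; omega
  simp only [hcast] at h3
  rw [h3]
  congr 1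
  omega

-- the central lemma: row-wise slices equal A's per-cell quadrant loop
theorem quad_eq (g : List (List Int)) (n m : Int) (b : Bool)
    (hc : (ShapeNM g n m ∧ 0 < n ∧ 0 < m) ∨ n ≤ 0) :
    quadrantB g n m b = if b then op5gridA g n m else op6gridA g n m := by
  rcases hc with ⟨⟨hlen, hrows⟩, hn, hm⟩ | hn
  · -- proper n×m grid
    have hy2 : PySem.Int.floordiv n 2 = n / 2 := PySem.Int.floordiv_eq_ediv_of_pos (by omega)
    have hx2 : PySem.Int.floordiv m 2 = m / 2 := PySem.Int.floordiv_eq_ediv_of_pos (by omega)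
    have hrl : ∀ i : Int, 0 ≤ i → i < n →
        ((PySem.List.pyGetD g i ([] : List Int)).length : Int) = m := by
      intro i h0 h1
      rw [PySem.List.pyGetD_eq_getElem g [] h0 (by omega)]
      exact hrows _ (List.getElem_mem _)
    simp only [quadrantB, op5gridA, op6gridA, hy2, hx2]
    have hy0 : 0 ≤ n / 2 := by omega
    have hyn : n / 2 ≤ n := by omega
    have hyy : n / 2 + n / 2 ≤ n := by omega
    have hx0 : 0 ≤ m / 2 := by omega
    have hxm : m / 2 ≤ m := by omega
    have hxx : m / 2 + m / 2 ≤ m := by omega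
    cases b <;>
      simp only [if_true, if_false, Bool.false_eq_true] <;>
      rw [PySem.List.pyRange_one_append 0 (n / 2) n hy0 hyn, List.map_append] <;>
      congr 1
    -- four goals: (op6 top, op6 bottom, op5 top, op5 bottom)
    · apply List.map_congr_left
      intro i hi
      rw [PySem.List.mem_pyRange_one] at hi
      rw [PySem.List.pyRange_one_append 0 (m / 2) m hx0 hxm, List.map_append]
      congr 1
      · rw [List.map_congr_left (g := fun j =>
            PySem.List.pyGetD (PySem.List.pyGetD g i []) (j - m / 2) 0)
            (by intro j hj; rw [PySem.List.mem_pyRange_one] at hj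
                rw [if_pos ⟨hi.1, hi.2, hj.1, hj.2⟩])]
        exact (piece_neg_drop _ _ _ hx0 hxm (hrl i hi.1 (by omega)).symm).symm
      · rw [List.map_congr_left (g := fun j =>
            PySem.List.pyGetD (PySem.List.pyGetD g (i + n / 2) []) j 0)
            (by intro j hj; rw [PySem.List.mem_pyRange_one] at hj
                rw [if_neg (by omega), if_pos ⟨hi.1, hi.2, hj.1, hj.2⟩])]
        exact (piece_drop _ _ m hx0 (hrl (i + n / 2) (by omega) (by omega)).symm).symm
    · apply List.map_congr_left
      intro i hi
      rw [PySem.List.mem_pyRange_one] at hi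
      rw [PySem.List.pyRange_one_append 0 (m / 2) m hx0 hxm, List.map_append]
      congr 1
      · rw [List.map_congr_left (g := fun j =>
            PySem.List.pyGetD (PySem.List.pyGetD g (i - n / 2) []) j 0)
            (by intro j hj; rw [PySem.List.mem_pyRange_one] at hj
                rw [if_neg (by omega), if_neg (by omega), if_neg (by omega)])]
        exact (piece_take _ _ hx0 (by rw [hrl (i - n / 2) (by omega) (by omega)]; omega)).symm
      · rw [List.map_congr_left (g := fun j =>
            PySem.List.pyGetD (PySem.List.pyGetD g i []) (j - m / 2) 0)
            (by intro j hj; rw [PySem.List.mem_pyRange_one] at hj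
                rw [if_neg (by omega), if_neg (by omega), if_pos ⟨hi.1, hi.2, hj.1, hj.2⟩])]
        exact (piece_take_shift _ _ _ hx0 hxm (by rw [hrl i (by omega) (by omega)]; omega)).symm
    · apply List.map_congr_left
      intro i hi
      rw [PySem.List.mem_pyRange_one] at hi
      rw [PySem.List.pyRange_one_append 0 (m / 2) m hx0 hxm, List.map_append]
      congr 1
      · rw [List.map_congr_left (g := fun j =>
            PySem.List.pyGetD (PySem.List.pyGetD g (i + n / 2) []) j 0)
            (by intro j hj; rw [PySem.List.mem_pyRange_one] at hj
                rw [if_pos ⟨hi.1, hi.2, hj.1, hj.2⟩])]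
        exact (piece_take _ _ hx0 (by rw [hrl (i + n / 2) (by omega) (by omega)]; omega)).symm
      · rw [List.map_congr_left (g := fun j =>
            PySem.List.pyGetD (PySem.List.pyGetD g i []) (j - m / 2) 0)
            (by intro j hj; rw [PySem.List.mem_pyRange_one] at hj
                rw [if_neg (by omega), if_pos ⟨hi.1, hi.2, hj.1, hj.2⟩])]
        exact (piece_take_shift _ _ _ hx0 hxm (by rw [hrl i (by omega) (by omega)]; omega)).symm
    · apply List.map_congr_left
      intro i hi
      rw [PySem.List.mem_pyRange_one] at hi
      rw [PySem.List.pyRange_one_append 0 (m / 2) m hx0 hxm, List.map_append]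
      congr 1
      · rw [List.map_congr_left (g := fun j =>
            PySem.List.pyGetD (PySem.List.pyGetD g i []) (j - m / 2) 0)
            (by intro j hj; rw [PySem.List.mem_pyRange_one] at hj
                rw [if_neg (by omega), if_neg (by omega), if_neg (by omega)])]
        exact (piece_neg_drop _ _ _ hx0 hxm (hrl i (by omega) (by omega)).symm).symm
      · rw [List.map_congr_left (g := fun j =>
            PySem.List.pyGetD (PySem.List.pyGetD g (i - n / 2) []) j 0)
            (by intro j hj; rw [PySem.List.mem_pyRange_one] at hj
                rw [if_neg (by omega), if_neg (by omega), if_pos ⟨hi.1, hi.2, hj.1, hj.2⟩])]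
        exact (piece_drop _ _ m hx0 (hrl (i - n / 2) (by omega) (by omega)).symm).symm
  · -- degenerate n ≤ 0: every range is empty on both sides
    cases b <;>
      simp [quadrantB, op5gridA, op6gridA,
        PySem.List.pyRange_one_eq_nil (show n / 2 ≤ 0 by omega),
        PySem.List.pyRange_one_eq_nil (show n ≤ n / 2 by omega),
        PySem.List.pyRange_one_eq_nil hn]

theorem shape_op5 (g : List (List Int)) (n m : Int) (hn : 0 ≤ n) (hm : 0 ≤ m) :
    ShapeNM (op5gridA g n m) n m := by
  constructor
  · simp [op5gridA, PySem.List.length_pyRange_one]; omega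
  · intro r hr
    simp only [op5gridA, List.mem_map] at hr
    obtain ⟨i, _, rfl⟩ := hr
    simp [PySem.List.length_pyRange_one]; omega

theorem shape_op6 (g : List (List Int)) (n m : Int) (hn : 0 ≤ n) (hm : 0 ≤ m) :
    ShapeNM (op6gridA g n m) n m := by
  constructor
  · simp [op6gridA, PySem.List.length_pyRange_one]; omega
  · intro r hr
    simp only [op6gridA, List.mem_map] at hr
    obtain ⟨i, _, rfl⟩ := hr
    simp [PySem.List.length_pyRange_one]; omega

-- the loop invariant carried through the fold
def LoopInv (ops : List Int) (g : List (List Int)) (n m : Int) : Prop :=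
  quadDimOK ops n m ∨ (ShapeNM g n m ∧ 0 < n ∧ 0 < m)

theorem quadDimOK_tail {o : Int} {ops : List Int} {n m : Int}
    (h3 : o ≠ 3) (h4 : o ≠ 4) (h : quadDimOK (o :: ops) n m) : quadDimOK ops n m := by
  intro k hk
  have hh := h (k + 1) (by simpa using Nat.succ_lt_succ hk)
  simpa [List.countP_cons, h3, h4] using hh

theorem quadDimOK_swap {o : Int} {ops : List Int} {n m : Int}
    (ho : o = 3 ∨ o = 4) (h : quadDimOK (o :: ops) n m) : quadDimOK ops m n := by
  intro k hk
  have hh := h (k + 1) (by simpa using Nat.succ_lt_succ hk)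
  set c := (ops.take k).countP (fun o => o == 3 || o == 4) with hc
  have hcnt : ((o :: ops).take (k + 1)).countP (fun o => o == 3 || o == 4) = c + 1 := by
    rcases ho with rfl | rfl <;> simp [hc]
  rw [List.getElem_cons_succ] at hh
  rw [hcnt] at hh
  rcases hh with hb | ⟨c0, c1⟩
  · exact Or.inl hb
  · exact Or.inr ⟨fun he => c1 (by omega), fun he => c0 (by omega)⟩

theorem quadDimOK_head {o : Int} {ops : List Int} {n m : Int}
    (h : quadDimOK (o :: ops) n m) : (o = 1 ∨ o = 2 ∨ o = 3 ∨ o = 4) ∨ n ≤ 0 := by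
  have hh := h 0 (by simp)
  simp at hh
  tauto

-- B's final materialization, as a function of the whole fold state
def finB (s : List (List Int) × Bool × Bool × Int × Int) : List (List Int) × Int × Int :=
  (matzVH s.2.1 s.2.2.1 s.1, s.2.2.2.1, s.2.2.2.2)

theorem loop_eq (ops : List Int) :
    ∀ (g : List (List Int)) (v h : Bool) (n m : Int), LoopInv ops (matzVH v h g) n m →
    ops.foldl stepA (matzVH v h g, n, m) = finB (ops.foldl stepB (g, v, h, n, m)) := by
  induction ops with
  | nil => intro g v h n m _; rfl
  | cons o ops ih =>
    intro g v h n m hinv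
    simp only [List.foldl_cons]
    by_cases h1 : o = 1
    · subst h1
      simp only [stepA, stepB]
      norm_num
      rw [matzVH_reverse]
      refine ih g (!v) h n m ?_
      rw [← matzVH_reverse]
      rcases hinv with hq | ⟨hs, hn, hm⟩
      · exact Or.inl (quadDimOK_tail (by omega) (by omega) hq)
      · exact Or.inr ⟨shape_reverse hs, hn, hm⟩
    · by_cases h2 : o = 2
      · subst h2
        simp only [stepA, stepB]
        norm_num
        rw [matzVH_map_reverse]
        refine ih g v (!h) n m ?_
        rw [← matzVH_map_reverse]
        rcases hinv with hq | ⟨hs, hn, hm⟩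
        · exact Or.inl (quadDimOK_tail (by omega) (by omega) hq)
        · exact Or.inr ⟨shape_map_reverse hs, hn, hm⟩
      · by_cases h3 : o = 3
        · subst h3
          simp only [stepA, stepB]
          norm_num
          rw [← matzVH_id ((pyZip (matzVH v h g)).map List.reverse)]
          refine ih _ false false m n ?_
          rw [matzVH_id]
          rcases hinv with hq | ⟨hs, hn, hm⟩
          · exact Or.inl (quadDimOK_swap (Or.inl rfl) hq)
          · exact Or.inr ⟨shape_map_reverse (shape_pyZip hs hn (by omega)), hm, hn⟩
        · by_cases h4 : o = 4
          · subst h4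
            simp only [stepA, stepB]
            norm_num
            rw [← matzVH_id ((pyZip (matzVH v h g)).reverse)]
            refine ih _ false false m n ?_
            rw [matzVH_id]
            rcases hinv with hq | ⟨hs, hn, hm⟩
            · exact Or.inl (quadDimOK_swap (Or.inr rfl) hq)
            · exact Or.inr ⟨shape_reverse (shape_pyZip hs hn (by omega)), hm, hn⟩
          · -- quadrant ops: any o outside 1-4
            have hcase : (ShapeNM (matzVH v h g) n m ∧ 0 < n ∧ 0 < m) ∨ n ≤ 0 := by
              rcases hinv with hq | ⟨hs, hn, hm⟩
              · rcases quadDimOK_head hq with hb | hn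
                · omega
                · exact Or.inr hn
              · exact Or.inl ⟨hs, hn, hm⟩
            have htail : ∀ g', (0 < n → 0 < m → ShapeNM g' n m) → LoopInv ops g' n m := by
              intro g' hsh
              rcases hinv with hq | ⟨_, hn, hm⟩
              · exact Or.inl (quadDimOK_tail h3 h4 hq)
              · exact Or.inr ⟨hsh hn hm, hn, hm⟩
            by_cases h5 : o = 5
            · subst h5
              simp only [stepA, stepB]
              norm_num
              rw [show quadrantB (matzVH v h g) n m true = op5gridA (matzVH v h g) n m from
                by rw [quad_eq _ _ _ _ hcase]; simp]
              rw [← matzVH_id (op5gridA (matzVH v h g) n m)]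
              refine ih _ false false n m ?_
              rw [matzVH_id]
              exact htail _ fun hn hm => shape_op5 _ _ _ (by omega) (by omega)
            · simp only [stepA, stepB, if_neg h1, if_neg h2, if_neg h3, if_neg h4, if_neg h5]
              rw [show decide (o = 5) = false from by simp [h5]]
              rw [show quadrantB (matzVH v h g) n m false = op6gridA (matzVH v h g) n m from
                by rw [quad_eq _ _ _ _ hcase]; simp]
              rw [← matzVH_id (op6gridA (matzVH v h g) n m)]
              refine ih _ false false n m ?_
              rw [matzVH_id]
              exact htail _ fun hn hm => shape_op6 _ _ _ (by omega) (by omega)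

-- ===== VERDICT (by name: the statement is the Claim_ definition above) =====
theorem solve_spec : Claim_equal_solve := by
  intro arr operations n m _hdom hpre
  unfold Spec_solve solve solve_alt
  have hinv : LoopInv operations (matzVH false false arr) n m := by
    rw [matzVH_id]; unfold LoopInv ShapeNM; unfold Pre_solve at hpre; tauto
  have h := loop_eq operations arr false false n m hinv
  rw [matzVH_id] at h
  rw [h]
  rfl
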